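-- pv_equiv track=rewrite | github.com/MusicLang/musiclang | musiclang/predict/composer/auto_composer.py | _clean_instrument_names
-- ===== SOURCE A (Python) =====
-- def _clean_instrument_names(instruments):
--     """
--     Given a list of raw instrument, spread the voice indexes accordingly
--     eg : ['piano', 'piano'] -> ['piano__0', 'piano__1']
--     Returns
--     -------
--     list[str]
--     """
--     real_instruments = []
--     instrument_dict = {}
--     for instrument in instruments:
--         clean_instrument = ''.join(instrument.split('__')[:-1])
--         instrument_dict[clean_instrument] = instrument_dict.get(clean_instrument, -1) + 1
--         index = instrument_dict[clean_instrument]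
--         real_instruments.append(instrument + f'__{index}')
--
--     return real_instruments
-- ===== SOURCE B (Python) =====
-- def _clean_instrument_names(instruments):
--     """
--     Given a list of raw instrument, spread the voice indexes accordingly
--     eg : ['piano', 'piano'] -> ['piano__0', 'piano__1']
--     """
--     cleans = [''.join(s.split('__')[:-1]) for s in instruments]
--     groups = {}
--     for i, c in enumerate(cleans):
--         groups.setdefault(c, []).append(i)
--     result = [''] * len(instruments)
--     for positions in groups.values():
--         for count, pos in enumerate(positions):
--             result[pos] = instruments[pos] + f'__{count}'
--     return result
-- ===== Notes on version B (the rewrite author's own statement) =====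
-- stated objective: alternative
-- what changed: B replaces A's single pass with an interleaved result-building counter dict by a group-then-assign scheme: one pass collects the positions of each cleaned name into a dict of position lists, then a second pass preallocates the result and fills each group's slots with their enumerated ranks.
import Mathlib
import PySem

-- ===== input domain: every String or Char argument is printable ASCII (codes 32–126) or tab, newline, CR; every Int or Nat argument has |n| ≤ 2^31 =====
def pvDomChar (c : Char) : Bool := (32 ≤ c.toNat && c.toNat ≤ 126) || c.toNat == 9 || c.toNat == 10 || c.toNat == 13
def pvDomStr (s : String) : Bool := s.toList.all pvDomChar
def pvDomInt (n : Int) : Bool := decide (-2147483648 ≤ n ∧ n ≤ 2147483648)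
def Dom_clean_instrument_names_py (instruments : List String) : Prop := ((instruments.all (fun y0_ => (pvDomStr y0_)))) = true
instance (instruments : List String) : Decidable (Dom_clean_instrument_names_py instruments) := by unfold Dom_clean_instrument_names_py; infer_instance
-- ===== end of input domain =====

-- B replaces A's interleaved counter-dict pass by a group-then-assign scheme (collect each
-- cleaned name's positions, then fill a preallocated result with enumerated ranks); alternative, not faster.


-- shared helper: ''.join(instrument.split('__')[:-1])  (both Pythons contain this expression verbatim)
def pvClean (s : String) : String :=
  PySem.Str.join "" (PySem.List.slice ((PySem.Str.split? s "__").getD []) none (some (-1)))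

-- ===== PORT A =====
def pvStepA (st : List String × PySem.Dict String Int) (instrument : String) :
    List String × PySem.Dict String Int :=
  let clean := pvClean instrument
  let d := st.2.insert clean (st.2.getD clean (-1) + 1)
  let index := d.getD clean 0   -- instrument_dict[clean]: the key was just inserted, so present
  (st.1 ++ [instrument ++ "__" ++ PySem.Int.toStr index], d)

def clean_instrument_names_py (instruments : List String) : List String :=
  (instruments.foldl pvStepA ([], PySem.Dict.empty)).1

-- ===== PORT B =====
def clean_instrument_names_py_alt (instruments : List String) : List String :=
  let cleans := instruments.map pvClean
  let groups := (PySem.List.enumerate cleans 0).foldl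
      (fun (d : PySem.Dict String (List Int)) p => d.modify p.2 [] (· ++ [p.1])) PySem.Dict.empty
  let res := PySem.List.pyRepeat [""] (PySem.List.len instruments)   -- [''] * len(instruments)
  groups.values.foldl (fun res positions =>
    (PySem.List.enumerate positions 0).foldl
      (fun res q => PySem.List.pySetD res q.2
        (PySem.List.pyGetD instruments q.2 "" ++ "__" ++ PySem.Int.toStr q.1)) res) res

-- ===== PRECONDITION & SPEC =====
def Spec_clean_instrument_names_py (instruments : List String) (out : List String) : Prop := out = clean_instrument_names_py_alt instruments
instance (instruments : List String) (out : List String) : Decidable (Spec_clean_instrument_names_py instruments out) := by unfold Spec_clean_instrument_names_py; infer_instance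

-- ===== CLAIM (what is proved, stated in full; the proofs are below) =====
def Claim_equal_clean_instrument_names_py : Prop := ∀ (instruments : List String), Dom_clean_instrument_names_py instruments → Spec_clean_instrument_names_py instruments (clean_instrument_names_py instruments)

-- ===== LEMMAS AND PROOFS =====

-- reference: element for x after prefix `pref` is x ++ "__" ++ str(count of clean x among cleans of pref)
def pvGo (pref l : List String) : List String :=
  match l with
  | [] => []
  | x :: xs =>
      (x ++ "__" ++ PySem.Int.toStr ((pref.map pvClean).count (pvClean x) : Int)) :: pvGo (pref ++ [x]) xs

theorem pvA_loop (l : List String) : ∀ (acc : List String) (d : PySem.Dict String Int) (pref : List String),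
    (∀ k, d.getD k (-1) = ((pref.map pvClean).count k : Int) - 1) →
    (l.foldl pvStepA (acc, d)).1 = acc ++ pvGo pref l := by
  induction l with
  | nil => intro acc d pref _; simp [pvGo]
  | cons x xs ih =>
      intro acc d pref hinv
      have hx := hinv (pvClean x)
      simp only [List.foldl_cons, pvStepA, pvGo]
      rw [ih _ _ (pref ++ [x]) ?_]
      · simp only [PySem.Dict.getD, PySem.Dict.get?_insert_self, Option.getD_some] at hx ⊢
        simp [hx]
      · intro k
        by_cases hk : pvClean x = k
        · subst hk
          simp only [PySem.Dict.getD, PySem.Dict.get?_insert_self, Option.getD_some] at hx ⊢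
          rw [hx]
          simp [List.count_append]
        · simp only [PySem.Dict.getD]
          rw [PySem.Dict.get?_insert_of_ne d _ (fun a => hk a.symm)]
          have := hinv k
          simp only [PySem.Dict.getD] at this
          rw [this]
          simp [List.count_append, hk]

theorem pvGo_length (l : List String) : ∀ pref, (pvGo pref l).length = l.length := by
  induction l with
  | nil => intro pref; simp [pvGo]
  | cons x xs ih => intro pref; simp [pvGo, ih]

theorem pvGo_getElem? (l : List String) : ∀ (pref : List String) (j : Nat) (hj : j < l.length),
    (pvGo pref l)[j]? =
      some (l[j] ++ "__" ++ PySem.Int.toStr (((pref ++ l.take j).map pvClean).count (pvClean l[j]) : Int)) := by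
  induction l with
  | nil => intro pref j hj; simp at hj
  | cons x xs ih =>
      intro pref j hj
      cases j with
      | zero => simp [pvGo]
      | succ j =>
          simp only [pvGo, List.getElem?_cons_succ, List.getElem_cons_succ, List.take_succ_cons]
          rw [ih (pref ++ [x]) j (by simpa using hj)]
          simp only [List.append_assoc, List.singleton_append]

-- pvGrp cs k s = the positions (offset by s) at which the cleaned names cs carry the key k, in order
def pvGrp (cs : List String) (k : String) (s : Int) : List Int :=
  match cs with
  | [] => []
  | c :: tl => if c = k then s :: pvGrp tl k (s + 1) else pvGrp tl k (s + 1)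

theorem pvGrp_eq_filter (k : String) (cs : List String) : ∀ s,
    ((PySem.List.enumerate cs s).filter (fun p => p.2 == k)).map (·.1) = pvGrp cs k s := by
  induction cs with
  | nil => intro s; simp [pvGrp, PySem.List.enumerate_nil]
  | cons c tl ih =>
      intro s
      rw [PySem.List.enumerate_cons]
      by_cases h : c = k
      · simp [pvGrp, h, ih]
      · simp [pvGrp, h, ih]

theorem pvGrp_bounds (k : String) (cs : List String) : ∀ s x, x ∈ pvGrp cs k s → s ≤ x ∧ x < s + cs.length := by
  induction cs with
  | nil => intro s x hx; simp [pvGrp] at hx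
  | cons c tl ih =>
      intro s x hx
      simp only [pvGrp] at hx
      split at hx
      · rcases List.mem_cons.mp hx with h | h
        · subst h; simp only [List.length_cons]; push_cast; omega
        · have := ih (s + 1) x h; simp at this ⊢; omega
      · have := ih (s + 1) x hx; simp at this ⊢; omega

theorem pvGrp_mem_iff (k : String) (cs : List String) : ∀ (s : Int) (j : Nat) (hj : j < cs.length),
    ((s + (j : Int)) ∈ pvGrp cs k s ↔ cs[j] = k) := by
  induction cs with
  | nil => intro s j hj; simp at hj
  | cons c tl ih =>
      intro s j hj
      cases j with
      | zero =>
          simp only [Nat.cast_zero, add_zero, List.getElem_cons_zero]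
          by_cases h : c = k
          · rw [show pvGrp (c :: tl) k s = s :: pvGrp tl k (s + 1) from by simp [pvGrp, h]]
            simp [h]
          · rw [show pvGrp (c :: tl) k s = pvGrp tl k (s + 1) from by simp [pvGrp, h]]
            have hb := pvGrp_bounds k tl (s + 1)
            constructor
            · intro hmem; exact absurd ((hb _ hmem).1) (by omega)
            · intro he; exact absurd he h
      | succ j =>
          have hcast : s + ((j : Nat) + 1 : Nat) = (s + 1) + (j : Int) := by push_cast; ring
          simp only [List.getElem_cons_succ]
          rw [hcast]
          have hj' : j < tl.length := by simpa using hj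
          by_cases h : c = k
          · rw [show pvGrp (c :: tl) k s = s :: pvGrp tl k (s + 1) from by simp [pvGrp, h]]
            have hb := pvGrp_bounds k tl (s + 1)
            rw [List.mem_cons]
            constructor
            · rintro (he | hm)
              · exact absurd he (by omega)
              · exact (ih (s + 1) j hj').mp hm
            · intro he; exact Or.inr ((ih (s + 1) j hj').mpr he)
          · rw [show pvGrp (c :: tl) k s = pvGrp tl k (s + 1) from by simp [pvGrp, h]]
            exact ih (s + 1) j hj'

-- the inner write loop: for count, pos in enumerate(positions): result[pos] = val(count, pos)
theorem pvInner (val : Int → Int → String) (k : String) (cs : List String) :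
    ∀ (s t : Int) (res : List String), 0 ≤ s → s + (cs.length : Int) ≤ (res.length : Int) →
    (((PySem.List.enumerate (pvGrp cs k s) t).foldl
        (fun r (q : Int × Int) => PySem.List.pySetD r q.2 (val q.1 q.2)) res).length = res.length ∧
     ∀ (j : Nat), j < res.length →
      ((PySem.List.enumerate (pvGrp cs k s) t).foldl
        (fun r (q : Int × Int) => PySem.List.pySetD r q.2 (val q.1 q.2)) res)[j]? =
        if (j : Int) ∈ pvGrp cs k s
        then some (val (t + ((cs.take ((j : Int) - s).toNat).count k : Int)) (j : Int))
        else res[j]?) := by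
  induction cs with
  | nil =>
      intro s t res hs hlen
      refine ⟨by simp [pvGrp, PySem.List.enumerate_nil], ?_⟩
      intro j hj
      simp [pvGrp, PySem.List.enumerate_nil]
  | cons c tl ih =>
      intro s t res hs hlen
      simp only [List.length_cons] at hlen
      by_cases h : c = k
      · -- head matches: write position s with rank t, recurse with s+1, t+1
        rw [show pvGrp (c :: tl) k s = s :: pvGrp tl k (s + 1) from by simp [pvGrp, h]]
        have hwrite : PySem.List.pySetD res s (val t s) = res.set s.toNat (val t s) :=
          PySem.List.pySetD_of_nonneg res (val t s) hs
        have hlenset : (PySem.List.pySetD res s (val t s)).length = res.length := by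
          rw [hwrite, List.length_set]
        have ihres := ih (s + 1) (t + 1) (PySem.List.pySetD res s (val t s)) (by omega)
          (by rw [hlenset]; push_cast at hlen ⊢; omega)
        rw [PySem.List.enumerate_cons]
        simp only [List.foldl_cons]
        refine ⟨by rw [ihres.1, hlenset], ?_⟩
        intro j hj
        rw [ihres.2 j (by rw [hlenset]; exact hj)]
        by_cases hjm : (j : Int) ∈ pvGrp tl k (s + 1)
        · have hb := pvGrp_bounds k tl (s + 1) _ hjm
          rw [if_pos hjm, if_pos (List.mem_cons.mpr (Or.inr hjm))]
          congr 2
          have h1 : ((j : Int) - s).toNat = (((j : Int) - (s + 1)).toNat) + 1 := by omega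
          rw [h1, List.take_succ_cons, List.count_cons]
          rw [show (c == k) = true from by simp [h]]
          simp
          ring
        · rw [if_neg hjm]
          by_cases hjs : (j : Int) = s
          · rw [if_pos (List.mem_cons.mpr (Or.inl hjs))]
            rw [hwrite]
            have hsj : s.toNat = j := by omega
            rw [hsj, List.getElem?_set_self hj]
            have hj0 : ((j : Int) - s).toNat = 0 := by omega
            rw [hj0]
            simp [hjs]
          · rw [if_neg (by rw [List.mem_cons]; rintro (he | hm); exact hjs he; exact hjm hm)]
            rw [hwrite, List.getElem?_set_ne (by omega)]
      · -- head does not match: nothing written at s, recurse with s+1, same t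
        rw [show pvGrp (c :: tl) k s = pvGrp tl k (s + 1) from by simp [pvGrp, h]]
        have ihres := ih (s + 1) t res (by omega) (by push_cast at hlen ⊢; omega)
        refine ⟨ihres.1, ?_⟩
        intro j hj
        rw [ihres.2 j hj]
        by_cases hjm : (j : Int) ∈ pvGrp tl k (s + 1)
        · have hb := pvGrp_bounds k tl (s + 1) _ hjm
          rw [if_pos hjm, if_pos hjm]
          congr 2
          have h1 : ((j : Int) - s).toNat = (((j : Int) - (s + 1)).toNat) + 1 := by omega
          rw [h1, List.take_succ_cons, List.count_cons]
          rw [show (c == k) = false from by simp [h]]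
          simp
        · rw [if_neg hjm, if_neg hjm]

-- the outer loop over the group lists of the keys ks
theorem pvOuter (val : Int → Int → String) (cs : List String) (ks : List String) :
    ∀ (res : List String), (cs.length : Int) ≤ (res.length : Int) →
    ((ks.foldl (fun r k => (PySem.List.enumerate (pvGrp cs k 0) 0).foldl
        (fun r (q : Int × Int) => PySem.List.pySetD r q.2 (val q.1 q.2)) r) res).length = res.length ∧
     ∀ (j : Nat) (hj : j < cs.length) (_ : j < res.length),
      (ks.foldl (fun r k => (PySem.List.enumerate (pvGrp cs k 0) 0).foldl
        (fun r (q : Int × Int) => PySem.List.pySetD r q.2 (val q.1 q.2)) r) res)[j]? =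
        if cs[j] ∈ ks
        then some (val ((cs.take j).count cs[j] : Int) (j : Int))
        else res[j]?) := by
  induction ks with
  | nil => intro res hlen; exact ⟨rfl, by intro j hj hj'; simp⟩
  | cons k ktl ih =>
      intro res hlen
      have hin := pvInner val k cs 0 0 res le_rfl (by simpa using hlen)
      have ihres := ih (((PySem.List.enumerate (pvGrp cs k 0) 0).foldl
        (fun r (q : Int × Int) => PySem.List.pySetD r q.2 (val q.1 q.2)) res)) (by rw [hin.1]; exact hlen)
      simp only [List.foldl_cons]
      refine ⟨by rw [ihres.1, hin.1], ?_⟩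
      intro j hj hj'
      rw [ihres.2 j hj (by rw [hin.1]; exact hj')]
      have hmem : ((j : Int) ∈ pvGrp cs k 0 ↔ cs[j] = k) := by
        have := pvGrp_mem_iff k cs 0 j hj
        simpa using this
      by_cases h1 : cs[j] ∈ ktl
      · rw [if_pos h1, if_pos (List.mem_cons.mpr (Or.inr h1))]
      · rw [if_neg h1, hin.2 j hj']
        by_cases h2 : cs[j] = k
        · rw [if_pos (hmem.mpr h2), if_pos (List.mem_cons.mpr (Or.inl h2))]
          have hto : ((j : Int) - 0).toNat = j := by omega
          rw [hto, ← h2, zero_add]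
        · rw [if_neg (fun hm => h2 (hmem.mp hm)),
              if_neg (by rw [List.mem_cons]; rintro (he | hm); exact h2 he; exact h1 hm)]

-- items of a dict with Nodup keys are (k, getD k dflt) over its keys
theorem pvItems_char {κ ν : Type} [BEq κ] [LawfulBEq κ] (d : PySem.Dict κ ν) (dflt : ν)
    (h : d.keys.Nodup) : d.items = d.keys.map (fun k => (k, d.getD k dflt)) := by
  have h1 : d.items = d.items.map (fun p => (p.1, d.getD p.1 dflt)) := by
    conv_lhs => rw [← List.map_id d.items]
    apply List.map_congr_left
    intro p hp
    have : d.getD p.1 dflt = p.2 := PySem.Dict.getD_of_mem_items d (by simpa using hp) h dflt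
    simp [this]
  calc d.items = d.items.map (fun p => (p.1, d.getD p.1 dflt)) := h1
    _ = d.keys.map (fun k => (k, d.getD k dflt)) := by
        simp only [PySem.Dict.keys, List.map_map]; rfl

-- the groups dict: per-key position lists and keys
theorem pvGroups_getD (cleans : List String) (k : String) :
    ((PySem.List.enumerate cleans 0).foldl
      (fun (d : PySem.Dict String (List Int)) p => d.modify p.2 [] (· ++ [p.1]))
      PySem.Dict.empty).getD k [] = pvGrp cleans k 0 := by
  have h1 : (PySem.List.enumerate cleans 0).foldl
      (fun (d : PySem.Dict String (List Int)) p => d.modify p.2 [] (· ++ [p.1])) PySem.Dict.empty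
    = ((PySem.List.enumerate cleans 0).map (fun p => (p.2, p.1))).foldl
      (fun (d : PySem.Dict String (List Int)) q => d.modify q.1 [] (· ++ [q.2])) PySem.Dict.empty := by
    rw [List.foldl_map]
  rw [h1, PySem.Dict.getD_foldl_modify_append, List.filter_map, List.map_map]
  simp only [Function.comp_def]
  rw [← pvGrp_eq_filter k cleans 0]
  simp [PySem.Dict.getD_empty]

theorem pvGroups_keys (cleans : List String) :
    ((PySem.List.enumerate cleans 0).foldl
      (fun (d : PySem.Dict String (List Int)) p => d.modify p.2 [] (· ++ [p.1]))
      PySem.Dict.empty).keys = PySem.Set.ofList cleans := by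
  rw [PySem.Dict.keys_foldl_modify_key]
  simp [PySem.List.map_snd_enumerate, PySem.Set.update_nil_left, PySem.Dict.keys_empty]

-- ===== VERDICT (by name: the statement is the Claim_ definition above) =====
theorem clean_instrument_names_py_spec : Claim_equal_clean_instrument_names_py := by
  intro instruments _
  unfold Spec_clean_instrument_names_py clean_instrument_names_py clean_instrument_names_py_alt
  rw [pvA_loop instruments [] PySem.Dict.empty [] (by intro k; simp [PySem.Dict.getD])]
  simp only [List.nil_append]
  set cleans := instruments.map pvClean with hcleans
  set groups := (PySem.List.enumerate cleans 0).foldl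
      (fun (d : PySem.Dict String (List Int)) p => d.modify p.2 [] (· ++ [p.1])) PySem.Dict.empty with hgroups
  have hkeys : groups.keys = PySem.Set.ofList cleans := pvGroups_keys cleans
  have hnodup : groups.keys.Nodup := by rw [hkeys]; exact PySem.Set.nodup_ofList cleans
  have hvalues : groups.values = groups.keys.map (fun k => groups.getD k []) := by
    simp only [PySem.Dict.values, pvItems_char groups [] hnodup, List.map_map]
    rfl
  have hvals : groups.values = (PySem.Set.ofList cleans).map (fun k => pvGrp cleans k 0) := by
    rw [hvalues, hkeys]
    exact List.map_congr_left (fun k _ => pvGroups_getD cleans k)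
  have hres0 : PySem.List.pyRepeat [""] (PySem.List.len instruments) = List.replicate instruments.length "" := by
    rw [PySem.List.len_eq, PySem.List.pyRepeat_singleton]
    simp
  rw [hres0, hvals, List.foldl_map]
  have hlenc : cleans.length = instruments.length := by simp [hcleans]
  have hout := pvOuter (fun rank pos => PySem.List.pyGetD instruments pos "" ++ "__" ++ PySem.Int.toStr rank)
    cleans (PySem.Set.ofList cleans) (List.replicate instruments.length "") (by simp [hlenc])
  simp only [] at hout
  apply List.ext_getElem?
  intro j
  by_cases hj : j < instruments.length
  · rw [hout.2 j (by omega) (by simpa using hj)]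
    have hjc : j < cleans.length := by omega
    have hjm : cleans[j] ∈ PySem.Set.ofList cleans := by
      rw [PySem.Set.mem_ofList]
      exact List.getElem_mem _
    rw [if_pos hjm, pvGo_getElem? instruments [] j hj]
    have hget : PySem.List.pyGetD instruments (j : Int) "" = instruments[j] := by
      rw [PySem.List.pyGetD_natCast]
      exact List.getD_eq_getElem _ _ hj
    have hcj : cleans[j] = pvClean instruments[j] := by simp [hcleans]
    rw [hget, hcj]
    have hcount : (cleans.take j).count (pvClean instruments[j])
        = (([] ++ instruments.take j).map pvClean).count (pvClean instruments[j]) := by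
      simp [hcleans, List.map_take]
    rw [hcount]
  · have h1 : (pvGo [] instruments).length ≤ j := by rw [pvGo_length]; omega
    have h2 : j ≥ (List.replicate instruments.length "").length := by simp; omega
    rw [List.getElem?_eq_none h1, List.getElem?_eq_none (by rw [hout.1]; exact h2)]
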